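-- pv_equiv track=rewrite | github.com/fede-ortega/OOAD-accuracy-consistency-LLMs | consistency_evaluation/ooad_label_evaluator.py | select_label
-- ===== SOURCE A (Python) =====
-- from typing import Dict, List, Any, Iterable
--
-- def select_label(labels: Iterable[str]) -> str:
--     counts: Dict[str, int] = {}
--     order: List[str] = []
--
--     for label in labels:
--         if label not in counts:
--             counts[label] = 0
--             order.append(label)
--         counts[label] += 1
--
--     if not counts:
--         raise ValueError("Cannot select a label from an empty sequence")
--
--     max_count = max(counts.values())
--     for label in order:
--         if counts[label] == max_count:
--             return label
--
--     raise RuntimeError("Majority selection failed unexpectedly")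
-- ===== SOURCE B (Python) =====
-- def select_label(labels):
--     labels = list(labels)
--     if not labels:
--         raise ValueError("Cannot select a label from an empty sequence")
--     return max(labels, key=labels.count)
-- ===== Notes on version B (the rewrite author's own statement) =====
-- stated objective: idiomatic
-- what changed: Replaces A's dict-counting loop with separate order list, max over values and a final scan by a single idiomatic max(labels, key=labels.count), whose first-maximal rule gives the same first-appearance tie-break.
import Mathlib
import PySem

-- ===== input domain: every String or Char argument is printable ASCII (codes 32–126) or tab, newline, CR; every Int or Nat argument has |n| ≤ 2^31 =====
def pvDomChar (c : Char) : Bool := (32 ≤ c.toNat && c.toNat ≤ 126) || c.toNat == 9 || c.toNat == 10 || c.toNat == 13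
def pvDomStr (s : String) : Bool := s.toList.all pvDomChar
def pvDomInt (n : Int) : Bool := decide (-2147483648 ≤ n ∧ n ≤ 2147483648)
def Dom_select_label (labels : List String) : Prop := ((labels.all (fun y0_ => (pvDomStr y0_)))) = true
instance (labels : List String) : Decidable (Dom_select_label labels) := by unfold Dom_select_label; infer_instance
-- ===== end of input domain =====

-- B replaces A's counts-dict + order-list + max-over-values + rescan by one idiomatic
-- max(labels, key=labels.count); equal return values on every non-empty list (both raise on []).

-- ===== PORT A =====
def select_label (labels : List String) : String :=
  -- 'for label in labels: if label not in counts: counts[label] = 0; order.append(label); counts[label] += 1'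
  let st := labels.foldl (fun (st : PySem.Dict String Int × List String) label =>
      let st' := if st.1.contains label then st else (st.1.insert label 0, st.2 ++ [label])
      (st'.1.modify label 0 (· + 1), st'.2))
    (PySem.Dict.empty, [])
  let counts := st.1
  let order := st.2
  -- 'if not counts: raise ValueError(...)' — excluded by Pre_select_label
  let max_count := (PySem.List.max? counts.values (fun v => v)).getD 0
  -- 'for label in order: if counts[label] == max_count: return label'; the trailing
  -- 'raise RuntimeError' is unreachable on a non-empty list (find? = none never happens)
  (order.find? (fun label => counts.getD label 0 == max_count)).getD ""

-- ===== PORT B =====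
def select_label_alt (labels : List String) : String :=
  -- 'if not labels: raise ValueError(...)' / 'return max(labels, key=labels.count)':
  -- max? is none exactly on the empty list, where B raises (excluded by Pre_select_label)
  match PySem.List.max? labels (fun l => labels.count l) with
  | some m => m
  | none => ""

-- ===== PRECONDITION & SPEC =====
-- A raises ValueError on the empty list (and B does too): exclude it.
def Pre_select_label (labels : List String) : Prop := labels ≠ []
instance (labels : List String) : Decidable (Pre_select_label labels) := by unfold Pre_select_label; infer_instance
def pvWitness_select_label : List String := ["a", "b", "a"]

def Spec_select_label (labels : List String) (out : String) : Prop := out = select_label_alt labels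
instance (labels : List String) (out : String) : Decidable (Spec_select_label labels out) := by unfold Spec_select_label; infer_instance

-- ===== CLAIM (what is proved, stated in full; the proofs are below) =====
def Claim_equal_select_label : Prop := ∀ (labels : List String), Dom_select_label labels → Pre_select_label labels → Spec_select_label labels (select_label labels)

-- ===== LEMMAS AND PROOFS =====

-- A's loop body: both branches update counts by 'modify label 0 (· + 1)', and order grows
-- exactly like a Set.add, so the fold splits into the Counter fold and Set.ofList's fold.
theorem foldA_split (ls : List String) :
    ∀ (d : PySem.Dict String Int) (o : List String),
    (∀ x, d.contains x = decide (x ∈ o)) →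
    ls.foldl (fun (st : PySem.Dict String Int × List String) label =>
        let st' := if st.1.contains label then st else (st.1.insert label 0, st.2 ++ [label])
        (st'.1.modify label 0 (· + 1), st'.2))
      (d, o)
    = (ls.foldl (fun d l => d.modify l 0 (· + 1)) d, ls.foldl PySem.Set.add o) := by
  induction ls with
  | nil => intro d o h; rfl
  | cons l t ih =>
    intro d o h
    simp only [List.foldl_cons]
    by_cases hmem : l ∈ o
    · have hc : d.contains l = true := by rw [h]; simpa using hmem
      have hstep : (let st' := if (d, o).1.contains l then (d, o) else ((d, o).1.insert l 0, (d, o).2 ++ [l])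
          ((st'.1.modify l 0 (· + 1), st'.2) : PySem.Dict String Int × List String))
          = (d.modify l 0 (· + 1), o) := by
        simp [hc]
      have hadd : PySem.Set.add o l = o := by
        unfold PySem.Set.add PySem.Set.contains
        simp [hmem]
      rw [hstep, hadd]
      apply ih
      intro x
      rw [PySem.Dict.contains_modify]
      by_cases hx : x = l
      · subst hx; simp [hmem]
      · simp [hx, h x]
    · have hc : d.contains l = false := by rw [h]; simpa using hmem
      have hstep : (let st' := if (d, o).1.contains l then (d, o) else ((d, o).1.insert l 0, (d, o).2 ++ [l])
          ((st'.1.modify l 0 (· + 1), st'.2) : PySem.Dict String Int × List String))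
          = ((d.insert l 0).modify l 0 (· + 1), o ++ [l]) := by
        simp [hc]
      have hadd : PySem.Set.add o l = o ++ [l] := by
        unfold PySem.Set.add PySem.Set.contains
        simp [hmem]
      have hmod : (d.insert l 0).modify l 0 (· + 1) = d.modify l 0 (· + 1) := by
        unfold PySem.Dict.modify
        rw [PySem.Dict.getD_insert_self, PySem.Dict.insert_insert_self,
            PySem.Dict.getD_of_not_contains d 0 hc]
      rw [hstep, hmod, hadd]
      apply ih
      intro x
      rw [PySem.Dict.contains_modify]
      by_cases hx : x = l
      · subst hx; simp [List.mem_append]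
      · simp [hx, h x, List.mem_append]

-- find? over a Set.add-fold: elements already present contribute nothing new.
theorem find?_foldl_add (p : String → Bool) :
    ∀ (xs s : List String),
    ((xs.foldl PySem.Set.add s).find? p) = (s.find? p).or (xs.find? (fun x => p x && !s.contains x)) := by
  intro xs
  induction xs with
  | nil => intro s; simp
  | cons x t ih =>
    intro s
    simp only [List.foldl_cons]
    by_cases hmem : x ∈ s
    · have hadd : PySem.Set.add s x = s := by
        unfold PySem.Set.add PySem.Set.contains
        simp [hmem]
      rw [hadd, ih s]
      rw [List.find?_cons_of_neg (by simp [hmem])]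
    · have hadd : PySem.Set.add s x = s ++ [x] := by
        unfold PySem.Set.add PySem.Set.contains
        simp [hmem]
      rw [hadd, ih (s ++ [x])]
      by_cases hpx : p x = true
      · rw [List.find?_cons_of_pos (by simp [hpx, hmem])]
        rw [List.find?_append, List.find?_cons_of_pos hpx]
        cases hfs : s.find? p with
        | none => simp
        | some v => simp
      · have hpxf : p x = false := by simpa using hpx
        rw [List.find?_cons_of_neg (by simp [hpxf])]
        have hfind : (s ++ [x]).find? p = s.find? p := by
          rw [List.find?_append, List.find?_cons_of_neg (by simp [hpxf])]
          simp
        rw [hfind]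
        have hcong : (fun y => p y && !(s ++ [x]).contains y)
            = (fun y => p y && !s.contains y) := by
          funext y
          by_cases hy : y = x
          · subst hy; simp [hpxf]
          · simp [List.mem_append, hy]
        rw [hcong]

-- running first-max loop: its result is the first element whose key is maximal.
theorem firstMax_find? (key : String → Nat) :
    ∀ (t : List String) (m : String),
    (m :: t).find? (fun x => decide (∀ y ∈ m :: t, key y ≤ key x))
      = some (t.foldl (fun m y => if key m < key y then y else m) m) := by
  intro t
  induction t with
  | nil => intro m; simp
  | cons y t ih =>
    intro m
    by_cases h : key m < key y
    · have hPm : (decide (∀ z ∈ m :: y :: t, key z ≤ key m)) = false := by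
        simp only [decide_eq_false_iff_not]
        intro hall
        exact absurd (hall y (by simp)) (by omega)
      rw [List.find?_cons_of_neg (by simpa using hPm)]
      have hcong : (fun x => decide (∀ z ∈ m :: y :: t, key z ≤ key x))
          = (fun x => decide (∀ z ∈ y :: t, key z ≤ key x)) := by
        funext x
        rw [decide_eq_decide]
        simp only [List.mem_cons, forall_eq_or_imp]
        constructor
        · rintro ⟨_, h2, h3⟩; exact ⟨h2, h3⟩
        · rintro ⟨h2, h3⟩
          refine ⟨by omega, h2, h3⟩
      rw [hcong]
      simp only [List.foldl_cons, if_pos h]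
      exact ih y
    · have hym : key y ≤ key m := by omega
      have hcong : (fun x => decide (∀ z ∈ m :: y :: t, key z ≤ key x))
          = (fun x => decide (∀ z ∈ m :: t, key z ≤ key x)) := by
        funext x
        rw [decide_eq_decide]
        simp only [List.mem_cons, forall_eq_or_imp]
        constructor
        · rintro ⟨h1, _, h3⟩; exact ⟨h1, h3⟩
        · rintro ⟨h1, h3⟩; exact ⟨h1, by omega, h3⟩
      rw [hcong]
      have step : (m :: y :: t).find? (fun x => decide (∀ z ∈ m :: t, key z ≤ key x))
          = (m :: t).find? (fun x => decide (∀ z ∈ m :: t, key z ≤ key x)) := by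
        by_cases hm : (decide (∀ z ∈ m :: t, key z ≤ key m)) = true
        · rw [List.find?_cons_of_pos (by simpa using hm), List.find?_cons_of_pos (by simpa using hm)]
        · have hmf : (decide (∀ z ∈ m :: t, key z ≤ key m)) = false := by simpa using hm
          have hyf : (decide (∀ z ∈ m :: t, key z ≤ key y)) = false := by
            simp only [decide_eq_false_iff_not] at hmf ⊢
            intro hall; exact hmf (fun z hz => le_trans (hall z hz) hym)
          rw [List.find?_cons_of_neg (by simpa using hmf), List.find?_cons_of_neg (by simpa using hyf),
              List.find?_cons_of_neg (by simpa using hmf)]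
      rw [step]
      simp only [List.foldl_cons, if_neg h]
      exact ih m

-- max? on a cons steps by combining the two head elements (Python's running max).
theorem max?_cons_cons (key : String → Nat) (x y : String) (t : List String) :
    PySem.List.max? (x :: y :: t) key
      = PySem.List.max? ((if key x < key y then y else x) :: t) key := by
  by_cases h : key x < key y
  · rw [if_pos h]
    show List.foldl _ (if key x < key y then some y else some x) t = List.foldl _ (some y) t
    rw [if_pos h]
  · rw [if_neg h]
    show List.foldl _ (if key x < key y then some y else some x) t = List.foldl _ (some x) t
    rw [if_neg h]

-- max? on a non-empty list is the plain running first-max loop from the head.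
theorem max?_cons_foldl (key : String → Nat) :
    ∀ (t : List String) (x : String),
    PySem.List.max? (x :: t) key
      = some (t.foldl (fun m y => if key m < key y then y else m) x) := by
  intro t
  induction t with
  | nil => intro x; rfl
  | cons y t ih =>
    intro x
    rw [max?_cons_cons key x y t, ih (if key x < key y then y else x)]
    simp only [List.foldl_cons]

-- the maximum of the counter's values is the maximum multiplicity, and testing a count
-- against it is testing "this label's count is maximal".
theorem pred_eq (x : String) (rest : List String) (M : Int)
    (hM : PySem.List.max? ((PySem.Set.ofList (x :: rest)).map (fun k => (List.count k (x :: rest) : Int)))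
            (fun v => v) = some M) (l : String) :
    ((List.count l (x :: rest) : Int) == M)
      = decide (∀ y ∈ x :: rest, List.count y (x :: rest) ≤ List.count l (x :: rest)) := by
  have hub : ∀ y ∈ x :: rest, (List.count y (x :: rest) : Int) ≤ M := by
    intro y hy
    exact PySem.List.max?_isMax hM _
      (List.mem_map_of_mem ((PySem.Set.mem_ofList (x :: rest) y).mpr hy))
  obtain ⟨k, hkmem, hkM⟩ := List.mem_map.mp (PySem.List.max?_mem hM)
  have hkL : k ∈ x :: rest := (PySem.Set.mem_ofList (x :: rest) k).mp hkmem
  rw [Bool.eq_iff_iff, beq_iff_eq, decide_eq_true_eq]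
  constructor
  · intro hEq y hy
    have := hub y hy
    rw [← hEq] at this
    exact_mod_cast this
  · intro hall
    by_cases hl : l ∈ x :: rest
    · have h1 : (List.count l (x :: rest) : Int) ≤ M :=
        hub l hl
      have h2 : M ≤ (List.count l (x :: rest) : Int) := by
        rw [← hkM]
        exact_mod_cast hall k hkL
      omega
    · have hz : List.count l (x :: rest) = 0 := List.count_eq_zero_of_not_mem hl
      have hx1 : 0 < List.count x (x :: rest) := List.count_pos_iff.mpr (by simp)
      have := hall x (by simp)
      omega

theorem select_label_eq (labels : List String) (h : labels ≠ []) :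
    select_label labels = select_label_alt labels := by
  obtain ⟨x, rest, rfl⟩ : ∃ a r, labels = a :: r := by
    cases labels with
    | nil => exact absurd rfl h
    | cons a b => exact ⟨a, b, rfl⟩
  have hinv : ∀ z : String,
      (PySem.Dict.empty : PySem.Dict String Int).contains z = decide (z ∈ ([] : List String)) := by
    intro z; simp [PySem.Dict.contains_empty]
  have hsplit := foldA_split (x :: rest) PySem.Dict.empty [] hinv
  unfold select_label
  rw [hsplit]
  dsimp only
  rw [← PySem.Dict.counter_eq_foldl]
  have hvals : (PySem.Dict.counter (x :: rest)).values
      = (PySem.Set.ofList (x :: rest)).map (fun k => (List.count k (x :: rest) : Int)) := by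
    show List.map _ (PySem.Dict.counter (x :: rest)).items = _
    rw [PySem.Dict.items_counter, List.map_map]
    rfl
  rw [hvals]
  obtain ⟨M, hM⟩ : ∃ M, PySem.List.max?
      ((PySem.Set.ofList (x :: rest)).map (fun k => (List.count k (x :: rest) : Int)))
      (fun v => v) = some M := by
    cases hmm : PySem.List.max?
        ((PySem.Set.ofList (x :: rest)).map (fun k => (List.count k (x :: rest) : Int)))
        (fun v => v) with
    | some v => exact ⟨v, rfl⟩
    | none =>
      exfalso
      have hnil := (PySem.List.max?_eq_none_iff _ _).mp hmm
      have hx : x ∈ PySem.Set.ofList (x :: rest) :=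
        (PySem.Set.mem_ofList (x :: rest) x).mpr (by simp)
      rw [List.map_eq_nil_iff] at hnil
      simp [hnil] at hx
  rw [hM]
  have hpred : (fun label => ((PySem.Dict.counter (x :: rest)).getD label 0 == (some M).getD 0))
      = (fun l => decide (∀ y ∈ x :: rest,
          List.count y (x :: rest) ≤ List.count l (x :: rest))) := by
    funext l
    rw [PySem.Dict.getD_counter]
    exact pred_eq x rest M hM l
  rw [hpred]
  rw [show ((x :: rest).foldl PySem.Set.add [] : List String)
        = PySem.Set.ofList (x :: rest) from (PySem.Set.ofList_eq_foldl _).symm]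
  rw [PySem.Set.ofList_eq_foldl]
  rw [find?_foldl_add _ (x :: rest) []]
  have hsimp : (fun z => (decide (∀ y ∈ x :: rest,
          List.count y (x :: rest) ≤ List.count z (x :: rest)) && !(([] : List String).contains z)))
      = (fun z => decide (∀ y ∈ x :: rest,
          List.count y (x :: rest) ≤ List.count z (x :: rest))) := by
    funext z; simp
  rw [hsimp]
  rw [List.find?_nil, Option.none_or]
  rw [firstMax_find? (fun y => List.count y (x :: rest)) rest x]
  unfold select_label_alt
  rw [max?_cons_foldl (fun l => List.count l (x :: rest)) rest x]
  rfl

-- ===== VERDICT (by name: the statement is the Claim_ definition above) =====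
theorem select_label_spec : Claim_equal_select_label := by
  intro labels _ hpre
  unfold Spec_select_label
  exact select_label_eq labels hpre
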